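-- pv_equiv track=rewrite | github.com/wrmsr/omlish | x/shparse/pattern.py | has_meta
-- ===== SOURCE A (Python) =====
-- def has_meta(pat: str, mode: int = 0) -> bool:
--     i = 0
--     while i < len(pat):
--         c = pat[i]
--         if c == '\\':
--             i += 1
--         elif c in ('*', '?', '['):
--             return True
--         i += 1
--     return False
-- ===== SOURCE B (Python) =====
-- def has_meta(pat: str, mode: int = 0) -> bool:
--     # Strip every backslash-escaped pair via repeated partition, then scan the cleaned text.
--     pieces = []
--     rest = pat
--     while rest:
--         head, sep, tail = rest.partition('\\')
--         pieces.append(head)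
--         rest = tail[1:] if sep else ''
--     return any(c in '*?[' for c in ''.join(pieces))
-- ===== Notes on version B (the rewrite author's own statement) =====
-- stated objective: faster
-- what changed: A's single index-driven character-at-a-time scan that jumps over escaped characters is replaced by a two-phase algorithm: repeatedly partition on backslash to strip every escaped pair into a cleaned string, then a separate membership scan of the cleaned string for the glob metacharacters.
import Mathlib
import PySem

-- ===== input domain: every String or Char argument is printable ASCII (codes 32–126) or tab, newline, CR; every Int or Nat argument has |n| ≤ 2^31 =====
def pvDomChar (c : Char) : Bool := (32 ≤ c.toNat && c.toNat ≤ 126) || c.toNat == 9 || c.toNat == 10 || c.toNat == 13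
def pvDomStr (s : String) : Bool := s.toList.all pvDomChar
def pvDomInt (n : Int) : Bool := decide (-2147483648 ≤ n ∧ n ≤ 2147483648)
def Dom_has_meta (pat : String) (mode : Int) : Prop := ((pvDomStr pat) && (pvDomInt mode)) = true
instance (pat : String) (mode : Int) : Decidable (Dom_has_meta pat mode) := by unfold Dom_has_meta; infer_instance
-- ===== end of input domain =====

-- ===== PORT A =====
-- B differs from A only in structure; return values agree on all inputs (no mutation anywhere).
-- while loop of A: index i jumps over escaped characters, early-returns on a metacharacter.
def hasMetaLoop (s : List Char) (i : Nat) : Bool :=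
  if h : i < s.length then
    let c := s[i]
    if c = '\\' then hasMetaLoop s (i + 2)
    else if c = '*' ∨ c = '?' ∨ c = '[' then true
    else hasMetaLoop s (i + 1)
  else false
termination_by s.length - i

def has_meta (pat : String) (mode : Int) : Bool := hasMetaLoop pat.toList 0

-- ===== PORT B =====
-- B's while loop: rest.partition('\\') → (head, sep, tail); keep head, drop the escaped char.
def cleanLoop (rest : List Char) : List Char :=
  if rest = [] then []
  else
    let head := rest.takeWhile (· ≠ '\\')
    let sep := head.length < rest.length
    let tail := rest.drop (head.length + 1)
    head ++ (if sep then cleanLoop (tail.drop 1) else [])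
termination_by rest.length
decreasing_by simp_all [List.length_drop]; omega

def has_meta_alt (pat : String) (mode : Int) : Bool :=
  (cleanLoop pat.toList).any (fun c => c = '*' ∨ c = '?' ∨ c = '[')

-- ===== PRECONDITION & SPEC =====
def Spec_has_meta (pat : String) (mode : Int) (out : Bool) : Prop := out = has_meta_alt pat mode
instance (pat : String) (mode : Int) (out : Bool) : Decidable (Spec_has_meta pat mode out) := by unfold Spec_has_meta; infer_instance

-- ===== CLAIM (what is proved, stated in full; the proofs are below) =====
def Claim_equal_has_meta : Prop := ∀ (pat : String) (mode : Int), Dom_has_meta pat mode → Spec_has_meta pat mode (has_meta pat mode)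

-- ===== LEMMAS AND PROOFS =====

lemma cleanLoop_nil : cleanLoop [] = [] := by simp [cleanLoop]

lemma cleanLoop_backslash (t : List Char) : cleanLoop ('\\' :: t) = cleanLoop (t.drop 1) := by
  rw [cleanLoop]
  simp [List.takeWhile]

lemma cleanLoop_cons (c : Char) (t : List Char) (hc : c ≠ '\\') :
    cleanLoop (c :: t) = c :: cleanLoop t := by
  conv_lhs => rw [cleanLoop]
  conv_rhs => rw [cleanLoop]
  by_cases ht : t = []
  · subst ht; simp [List.takeWhile, hc]
  · simp only [List.cons_ne_nil, if_false, ht, List.takeWhile_cons, hc,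
      List.length_cons, List.drop_succ_cons, decide_not]
    simp [List.drop_drop]

lemma main_lemma : ∀ (k : Nat) (s : List Char) (i : Nat), s.length - i ≤ k →
    hasMetaLoop s i = (cleanLoop (s.drop i)).any (fun c => c = '*' ∨ c = '?' ∨ c = '[') := by
  intro k
  induction k with
  | zero =>
    intro s i h
    have : ¬ i < s.length := by omega
    rw [hasMetaLoop]
    simp [this, List.drop_eq_nil_of_le (by omega : s.length ≤ i), cleanLoop_nil]
  | succ k ih =>
    intro s i h
    by_cases hi : i < s.length
    · have hdrop : s.drop i = s[i] :: s.drop (i + 1) := List.drop_eq_getElem_cons hi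
      rw [hasMetaLoop]
      simp only [hi, dif_pos]
      by_cases hb : s[i] = '\\'
      · rw [if_pos hb, hdrop, hb, cleanLoop_backslash, List.drop_drop]
        exact ih s (i + 2) (by omega)
      · rw [if_neg hb, hdrop, cleanLoop_cons _ _ hb]
        by_cases hm : s[i] = '*' ∨ s[i] = '?' ∨ s[i] = '['
        · simp [hm]
        · simp only [List.any_cons]
          rw [ih s (i + 1) (by omega)]
          simp [hm]
    · rw [hasMetaLoop]
      simp [hi, List.drop_eq_nil_of_le (by omega : s.length ≤ i), cleanLoop_nil]

-- ===== VERDICT (by name: the statement is the Claim_ definition above) =====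
theorem has_meta_spec : Claim_equal_has_meta := by
  intro pat mode _
  unfold Spec_has_meta has_meta has_meta_alt
  simpa using main_lemma pat.toList.length pat.toList 0 (by omega)
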